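-- pv_equiv track=rewrite | github.com/EmmaLeonhart/aelaki-wikibot | aelaki/numerals.py | cardinal
-- ===== SOURCE A (Python) =====
-- UNITS_12: list[str] = [
--     "",       # 0 placeholder
--     "Pan",    # 1
--     "Bal",    # 2
--     "Bhan",   # 3
--     "Mal",    # 4
--     "Tan",    # 5
--     "Dal",    # 6
--     "Dhan",   # 7
--     "Nal",    # 8
--     "Kan",    # 9
--     "Gal",    # 10
--     "Ghan",   # 11
--     "Nger",   # 12 (dozen marker)
-- ]
--
-- def cardinal(n: int) -> str:
--     """Generate cardinal number name.
--
--     Base-12 for 1-59, base-60 with Vibhi for 60+.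
--     """
--     if n <= 0:
--         return str(n)
--     if n == 60:
--         return "Vibhi"
--     if n <= 12:
--         return UNITS_12[n]
--     if n < 60:
--         dozens = n // 12
--         remainder = n % 12
--         if dozens == 1:
--             head = UNITS_12[12]  # "Nger"
--         else:
--             head = UNITS_12[dozens] + UNITS_12[12]
--         if remainder == 0:
--             return head
--         return head + UNITS_12[remainder]
--     # n > 60: mixed base-60
--     sixty_count = n // 60
--     rest = n % 60
--     head = ("" if sixty_count == 1 else cardinal(sixty_count)) + "Vibhi"
--     if rest == 0:
--         return head
--     return head + cardinal(rest)
-- ===== SOURCE B (Python) =====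
-- UNITS_12: list[str] = [
--     "", "Pan", "Bal", "Bhan", "Mal", "Tan", "Dal",
--     "Dhan", "Nal", "Kan", "Gal", "Ghan", "Nger",
-- ]
--
-- def _small(n: int) -> str:
--     """Name of 1 <= n <= 59 in base-12."""
--     if n <= 12:
--         return UNITS_12[n]
--     dozens, remainder = divmod(n, 12)
--     head = UNITS_12[12] if dozens == 1 else UNITS_12[dozens] + UNITS_12[12]
--     return head if remainder == 0 else head + UNITS_12[remainder]
--
-- def cardinal(n: int) -> str:
--     if n <= 0:
--         return str(n)
--     if n < 60:
--         return _small(n)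
--     # n >= 60: extract base-60 digits, least significant first
--     digits = []
--     m = n
--     while m:
--         digits.append(m % 60)
--         m //= 60
--     parts = [] if digits[-1] == 1 else [_small(digits[-1])]
--     for d in reversed(digits[:-1]):
--         parts.append("Vibhi")
--         if d:
--             parts.append(_small(d))
--     return "".join(parts)
-- ===== Notes on version B (the rewrite author's own statement) =====
-- stated objective: alternative
-- what changed: Replaced A's self-recursion on n//60 and n%60 by an explicit base-60 digit-extraction loop followed by a single left-to-right pass that assembles the name from the digit list (1..59 naming factored into a non-recursive helper).
import Mathlib
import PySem

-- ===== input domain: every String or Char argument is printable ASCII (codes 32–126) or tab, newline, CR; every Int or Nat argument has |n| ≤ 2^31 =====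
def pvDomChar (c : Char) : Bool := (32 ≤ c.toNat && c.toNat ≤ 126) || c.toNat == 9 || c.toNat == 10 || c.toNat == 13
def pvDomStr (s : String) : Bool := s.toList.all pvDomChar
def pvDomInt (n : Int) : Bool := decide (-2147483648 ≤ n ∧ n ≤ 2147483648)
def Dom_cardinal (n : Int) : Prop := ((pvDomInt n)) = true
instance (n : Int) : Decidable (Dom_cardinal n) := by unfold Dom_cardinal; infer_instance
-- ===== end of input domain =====

-- B replaces A's self-recursion by base-60 digit extraction plus one assembling pass (alternative decomposition; return value only).

-- ===== PORT A =====
def UNITS12 : List String :=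
  ["", "Pan", "Bal", "Bhan", "Mal", "Tan", "Dal", "Dhan", "Nal", "Kan", "Gal", "Ghan", "Nger"]

def cardinal (n : Int) : String :=
  if n ≤ 0 then PySem.Int.toStr n
  else if n = 60 then "Vibhi"
  else if n ≤ 12 then (PySem.List.pyGet? UNITS12 n).getD ""   -- index 1..12: always in range, getD default unreachable
  else if n < 60 then
    let dozens := PySem.Int.floordiv n 12
    let remainder := PySem.Int.mod n 12
    let head := if dozens = 1 then (PySem.List.pyGet? UNITS12 12).getD ""
                else (PySem.List.pyGet? UNITS12 dozens).getD "" ++ (PySem.List.pyGet? UNITS12 12).getD ""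
    if remainder = 0 then head else head ++ (PySem.List.pyGet? UNITS12 remainder).getD ""
  else
    let sixtyCount := PySem.Int.floordiv n 60
    let rest := PySem.Int.mod n 60
    let head := (if sixtyCount = 1 then "" else cardinal sixtyCount) ++ "Vibhi"
    if rest = 0 then head else head ++ cardinal rest
termination_by n.toNat
decreasing_by
  · have h1 : 1 ≤ PySem.Int.floordiv n 60 := by
      rw [PySem.Int.le_floordiv_iff_mul_le (by norm_num)]; omega
    have h2 : PySem.Int.floordiv n 60 < n := by
      rw [PySem.Int.floordiv_lt_iff_lt_mul (by norm_num)]; nlinarith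
    omega
  · have h1 : 0 ≤ PySem.Int.mod n 60 := PySem.Int.mod_nonneg _ (by norm_num)
    have h2 : PySem.Int.mod n 60 < 60 := PySem.Int.mod_lt _ (by norm_num)
    omega

-- ===== PORT B =====
-- port of B's helper _small (names 1..59, non-recursive)
def smallName (n : Int) : String :=
  if n ≤ 12 then (PySem.List.pyGet? UNITS12 n).getD ""
  else
    let dozens := PySem.Int.floordiv n 12
    let remainder := PySem.Int.mod n 12
    let head := if dozens = 1 then (PySem.List.pyGet? UNITS12 12).getD ""
                else (PySem.List.pyGet? UNITS12 dozens).getD "" ++ (PySem.List.pyGet? UNITS12 12).getD ""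
    if remainder = 0 then head else head ++ (PySem.List.pyGet? UNITS12 remainder).getD ""

-- port of B's `while m:` digit loop; the loop is only entered with m ≥ 1, so `m ≤ 0` = Python's exit test `m == 0`
def digits60 (m : Int) : List Int :=
  if m ≤ 0 then [] else PySem.Int.mod m 60 :: digits60 (PySem.Int.floordiv m 60)
termination_by m.toNat
decreasing_by
  have h2 : PySem.Int.floordiv m 60 < m := by
    rw [PySem.Int.floordiv_lt_iff_lt_mul (by norm_num)]; nlinarith
  omega

def cardinal_alt (n : Int) : String :=
  if n ≤ 0 then PySem.Int.toStr n
  else if n < 60 then smallName n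
  else
    -- digits[-1] is the head of the reversed digit list; digits[:-1] reversed is its tail
    match (digits60 n).reverse with
    | [] => ""   -- unreachable: n ≥ 60 gives a nonempty digit list
    | top :: rest =>
      let parts0 : List String := if top = 1 then [] else [smallName top]
      let parts := rest.foldl
        (fun acc d => if d = 0 then acc ++ ["Vibhi"] else acc ++ ["Vibhi", smallName d]) parts0
      String.join parts

-- ===== PRECONDITION & SPEC =====
def Spec_cardinal (n : Int) (out : String) : Prop := out = cardinal_alt n
instance (n : Int) (out : String) : Decidable (Spec_cardinal n out) := by unfold Spec_cardinal; infer_instance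

-- ===== CLAIM (what is proved, stated in full; the proofs are below) =====
def Claim_equal_cardinal : Prop := ∀ (n : Int), Dom_cardinal n → Spec_cardinal n (cardinal n)

-- ===== LEMMAS AND PROOFS =====

-- rendering of a reversed digit list (most significant first), the shape B's pass produces
def tailR : List Int → String
  | [] => ""
  | d :: ds => (if d = 0 then "Vibhi" else "Vibhi" ++ smallName d) ++ tailR ds

def renderR : List Int → String
  | [] => ""
  | t :: ds => (if t = 1 then "" else smallName t) ++ tailR ds

theorem tailR_append (a : List Int) (d : Int) :
    tailR (a ++ [d]) = tailR a ++ (if d = 0 then "Vibhi" else "Vibhi" ++ smallName d) := by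
  induction a with
  | nil => simp [tailR]
  | cons x xs ih => simp [tailR, ih, String.append_assoc]

theorem foldl_sappend : ∀ (l : List String) (s : String), l.foldl (· ++ ·) s = s ++ String.join l
  | [], s => by show s = s ++ String.join []; simp [String.join]
  | x :: xs, s => by
    show List.foldl (· ++ ·) (s ++ x) xs = s ++ String.join (x :: xs)
    rw [foldl_sappend xs (s ++ x)]
    have h : String.join (x :: xs) = x ++ String.join xs := by
      show List.foldl (· ++ ·) ("" ++ x) xs = _
      rw [foldl_sappend xs ("" ++ x)]; simp
    rw [h, String.append_assoc]

theorem join_append (a b : List String) : String.join (a ++ b) = String.join a ++ String.join b := by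
  show List.foldl (· ++ ·) "" (a ++ b) = _
  rw [List.foldl_append, foldl_sappend b]; rfl

theorem join_one (s : String) : String.join [s] = s := by
  show "" ++ s = s; simp

theorem join_two (s t : String) : String.join [s, t] = s ++ t := by
  show ("" ++ s) ++ t = s ++ t; simp

theorem join_foldl (rest : List Int) (p : List String) :
    String.join (rest.foldl
      (fun acc d => if d = 0 then acc ++ ["Vibhi"] else acc ++ ["Vibhi", smallName d]) p)
    = String.join p ++ tailR rest := by
  induction rest generalizing p with
  | nil => simp [tailR]
  | cons d ds ih =>
    simp only [List.foldl_cons, tailR]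
    rw [ih]
    by_cases hd : d = 0 <;>
      simp [hd, join_append, join_one, join_two, String.append_assoc]

theorem small_eq (n : Int) (h1 : 0 < n) (h2 : n < 60) : cardinal n = smallName n := by
  rw [cardinal, smallName]
  have hn : ¬ n ≤ 0 := by omega
  have h60 : n ≠ 60 := by omega
  simp only [hn, h60, if_false]
  by_cases h12 : n ≤ 12 <;> simp [h12, h2]

theorem digits60_small (m : Int) (h1 : 0 < m) (h2 : m < 60) : digits60 m = [m] := by
  have hm : PySem.Int.mod m 60 = m := by
    rw [PySem.Int.mod_eq_emod_of_pos (by norm_num)]; exact Int.emod_eq_of_lt (by omega) h2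
  have hd : PySem.Int.floordiv m 60 = 0 := by
    rw [PySem.Int.floordiv_eq_iff_of_pos (by norm_num)]; omega
  rw [digits60, if_neg (show ¬ m ≤ 0 by omega), hm, hd]
  rw [digits60, if_pos le_rfl]

theorem digits60_ne_nil (m : Int) (h1 : 0 < m) : digits60 m ≠ [] := by
  rw [digits60]; simp [show ¬ m ≤ 0 by omega]

theorem main_eq : ∀ (k : Nat) (n : Int), n.toNat ≤ k → 60 ≤ n →
    cardinal n = renderR ((digits60 n).reverse) := by
  intro k
  induction k with
  | zero => intro n hk h60; omega
  | succ k ih =>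
    intro n hk h60
    have hpos : 0 < n := by omega
    set sc := PySem.Int.floordiv n 60 with hsc
    set rest := PySem.Int.mod n 60 with hrest
    have hsc1 : 1 ≤ sc := by
      rw [hsc, PySem.Int.le_floordiv_iff_mul_le (by norm_num)]; omega
    have hscn : sc * 60 + rest = n := PySem.Int.floordiv_mul_add_mod n 60
    have hr0 : 0 ≤ rest := PySem.Int.mod_nonneg _ (by norm_num)
    have hr60 : rest < 60 := PySem.Int.mod_lt _ (by norm_num)
    have hdig : digits60 n = rest :: digits60 sc := by
      rw [digits60, if_neg (show ¬ n ≤ 0 by omega), hrest, hsc]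
    -- head part: (if sc = 1 then "" else cardinal sc) = renderR ((digits60 sc).reverse)
    have hhead : (if sc = 1 then "" else cardinal sc) = renderR ((digits60 sc).reverse) := by
      by_cases hsclt : sc < 60
      · rw [digits60_small sc (by omega) hsclt]
        by_cases h1 : sc = 1
        · simp [h1, renderR, tailR]
        · simp [renderR, tailR, h1, small_eq sc (by omega) hsclt]
      · have hscne : sc ≠ 1 := by omega
        have hsclt' : sc < n := by omega
        rw [if_neg hscne, ih sc (by omega) (by omega)]
    -- tail part
    obtain ⟨t, mid, hrv⟩ : ∃ t mid, (digits60 sc).reverse = t :: mid := by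
      rcases hx : (digits60 sc).reverse with _ | ⟨t, mid⟩
      · exact absurd (by simpa using congrArg List.reverse hx)
          (digits60_ne_nil sc (by omega))
      · exact ⟨t, mid, rfl⟩
    have hRapp : renderR ((digits60 n).reverse)
        = renderR ((digits60 sc).reverse)
          ++ (if rest = 0 then "Vibhi" else "Vibhi" ++ smallName rest) := by
      rw [hdig]; simp only [List.reverse_cons, hrv, List.cons_append, renderR,
        tailR_append, String.append_assoc]
    -- A's body for n > 60 (n ≥ 60 and n = 60 handled uniformly: when n = 60, sc = 1, rest = 0)
    by_cases h60' : n = 60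
    · subst h60'
      have : sc = 1 := by omega
      have hrz : rest = 0 := by omega
      rw [cardinal]; simp only [show ¬ (60:Int) ≤ 0 by norm_num, if_false]
      rw [hRapp, ← hhead, this, hrz]; simp
    · rw [cardinal]
      simp only [show ¬ n ≤ 0 by omega, h60', show ¬ n ≤ 12 by omega,
        show ¬ n < 60 by omega, if_false]
      rw [hRapp, ← hhead, ← hsc, ← hrest]
      by_cases hrz : rest = 0
      · simp [hrz]
      · have : cardinal rest = smallName rest := small_eq rest (by omega) hr60
        simp [hrz, this, String.append_assoc]

theorem alt_eq (n : Int) (h60 : 60 ≤ n) : cardinal_alt n = renderR ((digits60 n).reverse) := by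
  rw [cardinal_alt]
  simp only [show ¬ n ≤ 0 by omega, show ¬ n < 60 by omega, if_false]
  obtain ⟨t, mid, hrv⟩ : ∃ t mid, (digits60 n).reverse = t :: mid := by
    rcases hx : (digits60 n).reverse with _ | ⟨t, mid⟩
    · exact absurd (by simpa using congrArg List.reverse hx) (digits60_ne_nil n (by omega))
    · exact ⟨t, mid, rfl⟩
  rw [hrv]
  simp only [renderR, join_foldl]
  by_cases ht : t = 1 <;> simp [ht, String.join]

-- ===== VERDICT (by name: the statement is the Claim_ definition above) =====
theorem cardinal_spec : Claim_equal_cardinal := by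
  intro n _
  unfold Spec_cardinal
  by_cases h0 : n ≤ 0
  · rw [cardinal, cardinal_alt]; simp [h0]
  · by_cases h60 : n < 60
    · rw [small_eq n (by omega) h60, cardinal_alt]
      simp [h0, h60]
    · rw [main_eq n.toNat n le_rfl (by omega), alt_eq n (by omega)]
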